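-- pv_equiv track=rewrite | github.com/melnikoff-oleg/instagram-bot | gender.py | isBoy
-- ===== SOURCE A (Python) =====
-- boy = ['roma', 'roman', 'stepan', 'tima', 'timofey', 'yaroslav', 'ben', 'alex', 'alexander', 'andrew', 'artem',
-- 'daniil', 'dan', 'denis', 'dmitry', 'dimas', 'egor', 'ilya', 'kirill', 'max', 'maks', 'maksim', 'mark',
-- 'mihail', 'michael', 'misha', 'mike', 'oleg', 'off', 'anton', 'tony', 'aleks', 'fedor', 'fedya', 'nikita',
-- 'nikolay', 'arseniy', 'danil', 'mikhail', 'igor', 'vlad', 'vladislav', 'vlados', 'sergey', 'sergo', 'alexandr',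
-- 'anatoly', 'andrey', 'ignat', 'bodya', 'george', 'vladimir', 'vova', 'vovan', 'nazar', 'kolya', 'kolyan',
-- 'seva', 'pasha', 'kostya', 'konstantin', 'slava', 'gleb', 'valery', 'ivan', 'vanya', 'daniel', 'nik',
-- 'tolya', 'tima', 'boris', 'borya', 'sava', 'kiril', 'aleksnader', 'albert',
-- 'anatoly', 'ars', 'artur', 'arthur', 'afonya', 'bogdan', 'vadim', 'valera', 'vitaly', 'vyacheslav',
-- 'gena', 'gennady', 'pavel', 'german', 'grisha', 'gregory', 'eugene', 'ilysha', 'kostik',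
-- 'lev', 'leonid', 'makar', 'matvei', 'mathew', 'nick', 'nikola', 'petr', 'petya',
-- 'ruslan', 'serg', 'stanislav', 'stas', 'filipp', 'yury', 'yura', 'andr', 'ov', 'ev', 'paul', 'skiy', 'phil',
-- 'dima', 'dimka', 'mr', 'matvey', 'of', 'azat', 'yasha', 'in', 'slavik', 'sanek', 'richard', 'tema', 'vitya',
-- 'vano', 'evgeny', 'miroslav', 'yurka', 'yuriy', 'yurij', 'mitya', 'ildar', 'valentin', 'yra', 'volodya', 'rustam',
-- 'rodion', 'yung', 'lil', 'dmtry', 'joseph', 'iskander', 'gosha', 'daddy', 'graf', 'miguel', 'boy', 'timka',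
-- 'zahar', 'zakhar', 'mahmud', 'sanya', 'danya', 'vania', 'renat']
--
-- girl = ['lyba', 'ritka', 'katusha', 'olesia', 'olesya', 'evgenia', 'veronica', 'mary', 'valia', 'appolinaria',
-- 'anastasia', 'helen', 'vasilisa', 'elena', 'lena', 'lenka', 'julia', 'jenia', 'kristina', 'kris', 'veleria',
-- 'elina', 'alina', 'angelina', 'varya', 'nadya', 'vlada', 'anfisa', 'olga', 'olya', 'kseny', 'ksenya', 'xenia',
-- 'xenya', 'ksusha', 'ksu', 'lena', 'natasha', 'natali', 'polly', 'polina', 'polinka', 'sofia', 'sofya',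
-- 'valeria', 'tanya', 'tatiana', 'anya', 'taissia', 'ulyana', 'nastia', 'alena', 'alenka', 'eva', 'katya',
-- 'ekaterina', 'catharine', 'kate', 'elizaveta', 'liza', 'elisaveta', 'lisa', 'kira', 'rita', 'margo', 'maria',
-- 'masha', 'mashka', 'sofia', 'sonya', 'alexandra ', 'alisa', 'alice ', 'nastya', 'anastasia', 'anna', 'ann',
-- 'arina', 'valeria', 'lera', 'varvara', 'veronica', 'veronika', 'vera', 'victoria', 'viktoria', 'vika', 'darya',
-- 'dasha', 'daria', 'lidia', 'lida', 'maya', 'aleksandra', 'ova', 'eva', 'valentina', 'irina', 'ira', 'karina',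
-- 'lara', 'larisa', 'marina', 'nina', 'oksana', 'sveta', 'svetlana', 'skaya', 'mrs', 'ina', 'girl', 'yulya',
-- 'mariya', 'asya', 'alla', 'sonia', 'lena', 'tania', 'sya', 'ochka', 'princess', 'ovna',
-- 'yana', 'luba', 'shka', 'valya', 'jessica', 'lilia', 'marija', 'marie', 'stasya', 'polisha', 'katrin',
-- 'margarit', 'chka', 'yulia', 'nast', 'marusya', 'nika', 'olechka', 'eliz', 'elis', 'baby']
--
-- not_human = ['club', 'hse', 'gsom', 'spbu', 'itmo', 'boutique', 'sziu', 'unecon', 'shop']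
--
-- def real_person(name):
--     cropped = ''
--     lst = 'ц'
--     for i in name:
--         if i != lst and i != '.' and i != '_':
--             cropped += i
--         lst = i
--     name = cropped
--     n = len(name)
--     for i in range(n, 1, -1):
--         for j in range(0, n - i + 1):
--             s = name[j : j + i]
--             if s in not_human:
--                 return False
--     return True
--
-- def isBoy(name):
--     if not real_person(name):
--         return False
--     cropped = ''
--     lst = 'ц'
--     for i in name:
--         if i != lst and i != '.' and i != '_':
--             cropped += i
--         lst = i
--     name = cropped
--     n = len(name)
--     ok = False
--     for i in range(n, 1, -1):
--         if ok:
--             break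
--         for j in range(0, n - i + 1):
--             s = name[j : j + i]
--             if s in boy:
--                 return True
--             if s in girl:
--                 return False
--     return False
-- ===== SOURCE B (Python) =====
-- BOY = ("roma,roman,stepan,tima,timofey,yaroslav,ben,alex,alexander,andrew,arte"
--        "m,daniil,dan,denis,dmitry,dimas,egor,ilya,kirill,max,maks,maksim,mark,"
--        "mihail,michael,misha,mike,oleg,off,anton,tony,aleks,fedor,fedya,nikita"
--        ",nikolay,arseniy,danil,mikhail,igor,vlad,vladislav,vlados,sergey,sergo"
--        ",alexandr,anatoly,andrey,ignat,bodya,george,vladimir,vova,vovan,nazar,"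
--        "kolya,kolyan,seva,pasha,kostya,konstantin,slava,gleb,valery,ivan,vanya"
--        ",daniel,nik,tolya,tima,boris,borya,sava,kiril,aleksnader,albert,anatol"
--        "y,ars,artur,arthur,afonya,bogdan,vadim,valera,vitaly,vyacheslav,gena,g"
--        "ennady,pavel,german,grisha,gregory,eugene,ilysha,kostik,lev,leonid,mak"
--        "ar,matvei,mathew,nick,nikola,petr,petya,ruslan,serg,stanislav,stas,fil"
--        "ipp,yury,yura,andr,ov,ev,paul,skiy,phil,dima,dimka,mr,matvey,of,azat,y"
--        "asha,in,slavik,sanek,richard,tema,vitya,vano,evgeny,miroslav,yurka,yur"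
--        "iy,yurij,mitya,ildar,valentin,yra,volodya,rustam,rodion,yung,lil,dmtry"
--        ",joseph,iskander,gosha,daddy,graf,miguel,boy,timka,zahar,zakhar,mahmud"
--        ",sanya,danya,vania,renat").split(",")
--
-- GIRL = ("lyba,ritka,katusha,olesia,olesya,evgenia,veronica,mary,valia,appolinar"
--         "ia,anastasia,helen,vasilisa,elena,lena,lenka,julia,jenia,kristina,kris"
--         ",veleria,elina,alina,angelina,varya,nadya,vlada,anfisa,olga,olya,kseny"
--         ",ksenya,xenia,xenya,ksusha,ksu,lena,natasha,natali,polly,polina,polink"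
--         "a,sofia,sofya,valeria,tanya,tatiana,anya,taissia,ulyana,nastia,alena,a"
--         "lenka,eva,katya,ekaterina,catharine,kate,elizaveta,liza,elisaveta,lisa"
--         ",kira,rita,margo,maria,masha,mashka,sofia,sonya,alexandra ,alisa,alice"
--         " ,nastya,anastasia,anna,ann,arina,valeria,lera,varvara,veronica,veroni"
--         "ka,vera,victoria,viktoria,vika,darya,dasha,daria,lidia,lida,maya,aleks"
--         "andra,ova,eva,valentina,irina,ira,karina,lara,larisa,marina,nina,oksan"
--         "a,sveta,svetlana,skaya,mrs,ina,girl,yulya,mariya,asya,alla,sonia,lena,"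
--         "tania,sya,ochka,princess,ovna,yana,luba,shka,valya,jessica,lilia,marij"
--         "a,marie,stasya,polisha,katrin,margarit,chka,yulia,nast,marusya,nika,ol"
--         "echka,eliz,elis,baby").split(",")
--
-- NOT_HUMAN = "club,hse,gsom,spbu,itmo,boutique,sziu,unecon,shop".split(",")
--
--
-- def _crop(name):
--     # same cropping as the original: drop '.', '_' and any char equal to its predecessor
--     return ''.join(c for p, c in zip('\u0446' + name, name)
--                    if c != p and c != '.' and c != '_')
--
--
-- def isBoy(name):
--     s = _crop(name)
--     if any(w in s for w in NOT_HUMAN):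
--         return False
--     # best = (length, leftmost position, came-from-boy-list); a word only
--     # replaces the current best when its (length desc, position asc) key is
--     # strictly better, so boy words (processed first) win exact ties.
--     best = None
--     for tag, words in ((True, BOY), (False, GIRL)):
--         for w in words:
--             p = s.find(w)
--             if p >= 0 and (best is None or len(w) > best[0]
--                            or (len(w) == best[0] and p < best[1])):
--                 best = (len(w), p, tag)
--     return best is not None and best[2]
-- ===== Notes on version B (the rewrite author's own statement) =====
-- stated objective: faster
-- what changed: B keeps its word tables as comma-joined strings split once, crops via a zip-with-predecessor comprehension, and iterates over the boy/girl word lists using one str.find per word to keep the single best match under A's priority (length desc, position asc, boy-before-girl on exact ties), instead of enumerating all O(n^2) substrings of the name and scanning the word lists for each one.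
import Mathlib
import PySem

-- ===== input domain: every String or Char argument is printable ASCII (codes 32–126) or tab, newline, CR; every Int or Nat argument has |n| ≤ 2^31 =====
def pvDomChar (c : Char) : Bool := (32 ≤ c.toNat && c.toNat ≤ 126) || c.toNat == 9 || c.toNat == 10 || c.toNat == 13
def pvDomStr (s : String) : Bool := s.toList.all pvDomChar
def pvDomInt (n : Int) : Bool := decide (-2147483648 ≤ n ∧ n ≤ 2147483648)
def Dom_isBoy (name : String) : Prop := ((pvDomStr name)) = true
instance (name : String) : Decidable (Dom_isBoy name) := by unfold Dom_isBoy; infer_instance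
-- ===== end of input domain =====

-- B replaces A's enumeration of all substrings by one str.find per dictionary word, keeping the
-- single best match under A's priority (length desc, position asc, boy list first on exact ties);
-- same return value, measurably faster on long names.

-- ===== PORT A =====
-- module constants boy / girl / not_human (A's literal Python lists)
def boyW : List (List Char) := [
  "roma".toList, "roman".toList, "stepan".toList, "tima".toList, "timofey".toList,
  "yaroslav".toList, "ben".toList, "alex".toList, "alexander".toList, "andrew".toList,
  "artem".toList, "daniil".toList, "dan".toList, "denis".toList, "dmitry".toList,
  "dimas".toList, "egor".toList, "ilya".toList, "kirill".toList, "max".toList,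
  "maks".toList, "maksim".toList, "mark".toList, "mihail".toList, "michael".toList,
  "misha".toList, "mike".toList, "oleg".toList, "off".toList, "anton".toList,
  "tony".toList, "aleks".toList, "fedor".toList, "fedya".toList, "nikita".toList,
  "nikolay".toList, "arseniy".toList, "danil".toList, "mikhail".toList, "igor".toList,
  "vlad".toList, "vladislav".toList, "vlados".toList, "sergey".toList, "sergo".toList,
  "alexandr".toList, "anatoly".toList, "andrey".toList, "ignat".toList, "bodya".toList,
  "george".toList, "vladimir".toList, "vova".toList, "vovan".toList, "nazar".toList,
  "kolya".toList, "kolyan".toList, "seva".toList, "pasha".toList, "kostya".toList,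
  "konstantin".toList, "slava".toList, "gleb".toList, "valery".toList, "ivan".toList,
  "vanya".toList, "daniel".toList, "nik".toList, "tolya".toList, "tima".toList,
  "boris".toList, "borya".toList, "sava".toList, "kiril".toList, "aleksnader".toList,
  "albert".toList, "anatoly".toList, "ars".toList, "artur".toList, "arthur".toList,
  "afonya".toList, "bogdan".toList, "vadim".toList, "valera".toList, "vitaly".toList,
  "vyacheslav".toList, "gena".toList, "gennady".toList, "pavel".toList, "german".toList,
  "grisha".toList, "gregory".toList, "eugene".toList, "ilysha".toList, "kostik".toList,
  "lev".toList, "leonid".toList, "makar".toList, "matvei".toList, "mathew".toList,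
  "nick".toList, "nikola".toList, "petr".toList, "petya".toList, "ruslan".toList,
  "serg".toList, "stanislav".toList, "stas".toList, "filipp".toList, "yury".toList,
  "yura".toList, "andr".toList, "ov".toList, "ev".toList, "paul".toList,
  "skiy".toList, "phil".toList, "dima".toList, "dimka".toList, "mr".toList,
  "matvey".toList, "of".toList, "azat".toList, "yasha".toList, "in".toList,
  "slavik".toList, "sanek".toList, "richard".toList, "tema".toList, "vitya".toList,
  "vano".toList, "evgeny".toList, "miroslav".toList, "yurka".toList, "yuriy".toList,
  "yurij".toList, "mitya".toList, "ildar".toList, "valentin".toList, "yra".toList,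
  "volodya".toList, "rustam".toList, "rodion".toList, "yung".toList, "lil".toList,
  "dmtry".toList, "joseph".toList, "iskander".toList, "gosha".toList, "daddy".toList,
  "graf".toList, "miguel".toList, "boy".toList, "timka".toList, "zahar".toList,
  "zakhar".toList, "mahmud".toList, "sanya".toList, "danya".toList, "vania".toList,
  "renat".toList]
def girlW : List (List Char) := [
  "lyba".toList, "ritka".toList, "katusha".toList, "olesia".toList, "olesya".toList,
  "evgenia".toList, "veronica".toList, "mary".toList, "valia".toList, "appolinaria".toList,
  "anastasia".toList, "helen".toList, "vasilisa".toList, "elena".toList, "lena".toList,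
  "lenka".toList, "julia".toList, "jenia".toList, "kristina".toList, "kris".toList,
  "veleria".toList, "elina".toList, "alina".toList, "angelina".toList, "varya".toList,
  "nadya".toList, "vlada".toList, "anfisa".toList, "olga".toList, "olya".toList,
  "kseny".toList, "ksenya".toList, "xenia".toList, "xenya".toList, "ksusha".toList,
  "ksu".toList, "lena".toList, "natasha".toList, "natali".toList, "polly".toList,
  "polina".toList, "polinka".toList, "sofia".toList, "sofya".toList, "valeria".toList,
  "tanya".toList, "tatiana".toList, "anya".toList, "taissia".toList, "ulyana".toList,
  "nastia".toList, "alena".toList, "alenka".toList, "eva".toList, "katya".toList,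
  "ekaterina".toList, "catharine".toList, "kate".toList, "elizaveta".toList, "liza".toList,
  "elisaveta".toList, "lisa".toList, "kira".toList, "rita".toList, "margo".toList,
  "maria".toList, "masha".toList, "mashka".toList, "sofia".toList, "sonya".toList,
  "alexandra ".toList, "alisa".toList, "alice ".toList, "nastya".toList, "anastasia".toList,
  "anna".toList, "ann".toList, "arina".toList, "valeria".toList, "lera".toList,
  "varvara".toList, "veronica".toList, "veronika".toList, "vera".toList, "victoria".toList,
  "viktoria".toList, "vika".toList, "darya".toList, "dasha".toList, "daria".toList,
  "lidia".toList, "lida".toList, "maya".toList, "aleksandra".toList, "ova".toList,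
  "eva".toList, "valentina".toList, "irina".toList, "ira".toList, "karina".toList,
  "lara".toList, "larisa".toList, "marina".toList, "nina".toList, "oksana".toList,
  "sveta".toList, "svetlana".toList, "skaya".toList, "mrs".toList, "ina".toList,
  "girl".toList, "yulya".toList, "mariya".toList, "asya".toList, "alla".toList,
  "sonia".toList, "lena".toList, "tania".toList, "sya".toList, "ochka".toList,
  "princess".toList, "ovna".toList, "yana".toList, "luba".toList, "shka".toList,
  "valya".toList, "jessica".toList, "lilia".toList, "marija".toList, "marie".toList,
  "stasya".toList, "polisha".toList, "katrin".toList, "margarit".toList, "chka".toList,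
  "yulia".toList, "nast".toList, "marusya".toList, "nika".toList, "olechka".toList,
  "eliz".toList, "elis".toList, "baby".toList]
def notHumanW : List (List Char) := [
  "club".toList, "hse".toList, "gsom".toList, "spbu".toList, "itmo".toList,
  "boutique".toList, "sziu".toList, "unecon".toList, "shop".toList]

-- the duplicated cropping loop of A (it appears verbatim in real_person and in isBoy)
def pyCrop (s : List Char) : List Char :=
  (s.foldl (fun (st : List Char × Char) c =>
      (if c != st.2 && c != '.' && c != '_' then st.1 ++ [c] else st.1, c))
    ([], 'ц')).1

-- real_person: inner 'for j' loop (true = some slice hit not_human, i.e. 'return False' fired)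
def rpInner (s : List Char) (i : Int) : List Int → Bool
  | [] => false
  | j :: js =>
    if notHumanW.contains (PySem.List.slice s (some j) (some (j + i))) then true
    else rpInner s i js

-- real_person: outer 'for i' loop
def rpOuter (s : List Char) (n : Int) : List Int → Bool
  | [] => true
  | i :: is =>
    if rpInner s i (PySem.List.pyRange 0 (n - i + 1) 1) then false
    else rpOuter s n is

def realPerson (name : List Char) : Bool :=
  let s := pyCrop name
  let n : Int := (s.length : Int)
  rpOuter s n (PySem.List.pyRange n 1 (-1))

-- isBoy: inner 'for j' loop (some b = 'return b' fired)
def sbInner (s : List Char) (i : Int) : List Int → Option Bool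
  | [] => none
  | j :: js =>
    let t := PySem.List.slice s (some j) (some (j + i))
    if boyW.contains t then some true
    else if girlW.contains t then some false
    else sbInner s i js

-- isBoy: outer 'for i' loop with the (dead) 'ok' flag
def sbOuter (s : List Char) (n : Int) (ok : Bool) : List Int → Bool
  | [] => false
  | i :: is =>
    if ok then false
    else
      match sbInner s i (PySem.List.pyRange 0 (n - i + 1) 1) with
      | some b => b
      | none => sbOuter s n ok is

def isBoy (name : String) : Bool :=
  if !realPerson name.toList then false
  else
    let s := pyCrop name.toList
    let n : Int := (s.length : Int)
    sbOuter s n false (PySem.List.pyRange n 1 (-1))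

-- ===== PORT B =====
-- B's word tables: comma-joined string chunks, split once (Source B: ("…" "…").split(","))
def boyCs : List Char := "roma,roman,stepan,tima,timofey,yaroslav,ben,alex,alexander,andrew,arte".toList ++
  "m,daniil,dan,denis,dmitry,dimas,egor,ilya,kirill,max,maks,maksim,mark,".toList ++
  "mihail,michael,misha,mike,oleg,off,anton,tony,aleks,fedor,fedya,nikita".toList ++
  ",nikolay,arseniy,danil,mikhail,igor,vlad,vladislav,vlados,sergey,sergo".toList ++
  ",alexandr,anatoly,andrey,ignat,bodya,george,vladimir,vova,vovan,nazar,".toList ++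
  "kolya,kolyan,seva,pasha,kostya,konstantin,slava,gleb,valery,ivan,vanya".toList ++
  ",daniel,nik,tolya,tima,boris,borya,sava,kiril,aleksnader,albert,anatol".toList ++
  "y,ars,artur,arthur,afonya,bogdan,vadim,valera,vitaly,vyacheslav,gena,g".toList ++
  "ennady,pavel,german,grisha,gregory,eugene,ilysha,kostik,lev,leonid,mak".toList ++
  "ar,matvei,mathew,nick,nikola,petr,petya,ruslan,serg,stanislav,stas,fil".toList ++
  "ipp,yury,yura,andr,ov,ev,paul,skiy,phil,dima,dimka,mr,matvey,of,azat,y".toList ++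
  "asha,in,slavik,sanek,richard,tema,vitya,vano,evgeny,miroslav,yurka,yur".toList ++
  "iy,yurij,mitya,ildar,valentin,yra,volodya,rustam,rodion,yung,lil,dmtry".toList ++
  ",joseph,iskander,gosha,daddy,graf,miguel,boy,timka,zahar,zakhar,mahmud".toList ++
  ",sanya,danya,vania,renat".toList
def girlCs : List Char := "lyba,ritka,katusha,olesia,olesya,evgenia,veronica,mary,valia,appolinar".toList ++
  "ia,anastasia,helen,vasilisa,elena,lena,lenka,julia,jenia,kristina,kris".toList ++
  ",veleria,elina,alina,angelina,varya,nadya,vlada,anfisa,olga,olya,kseny".toList ++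
  ",ksenya,xenia,xenya,ksusha,ksu,lena,natasha,natali,polly,polina,polink".toList ++
  "a,sofia,sofya,valeria,tanya,tatiana,anya,taissia,ulyana,nastia,alena,a".toList ++
  "lenka,eva,katya,ekaterina,catharine,kate,elizaveta,liza,elisaveta,lisa".toList ++
  ",kira,rita,margo,maria,masha,mashka,sofia,sonya,alexandra ,alisa,alice".toList ++
  " ,nastya,anastasia,anna,ann,arina,valeria,lera,varvara,veronica,veroni".toList ++
  "ka,vera,victoria,viktoria,vika,darya,dasha,daria,lidia,lida,maya,aleks".toList ++
  "andra,ova,eva,valentina,irina,ira,karina,lara,larisa,marina,nina,oksan".toList ++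
  "a,sveta,svetlana,skaya,mrs,ina,girl,yulya,mariya,asya,alla,sonia,lena,".toList ++
  "tania,sya,ochka,princess,ovna,yana,luba,shka,valya,jessica,lilia,marij".toList ++
  "a,marie,stasya,polisha,katrin,margarit,chka,yulia,nast,marusya,nika,ol".toList ++
  "echka,eliz,elis,baby".toList
def nhCs : List Char := "club,hse,gsom,spbu,itmo,boutique,sziu,unecon,shop".toList
def boyWB : List (List Char) := PySem.Chars.splitOn boyCs ",".toList
def girlWB : List (List Char) := PySem.Chars.splitOn girlCs ",".toList
def nhWB : List (List Char) := PySem.Chars.splitOn nhCs ",".toList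

-- Source B's _crop: zip each character with its predecessor, keep the admissible ones
def cropB (s : List Char) : List Char :=
  ((('ц' :: s).zip s).filter
    (fun pc => pc.2 != pc.1 && pc.2 != '.' && pc.2 != '_')).map Prod.snd

-- one update step of B's best-match loop: keep (length, leftmost pos, tag), replace only on a
-- strictly better (length desc, pos asc) key
def bStep (s : List Char) (tag : Bool) (best : Option (Nat × Int × Bool)) (w : List Char) :
    Option (Nat × Int × Bool) :=
  let p := PySem.Chars.find s w
  if decide (0 ≤ p) &&
      (match best with
       | none => true
       | some (l, q, _) => decide (l < w.length) || (decide (w.length = l) && decide (p < q)))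
  then some (w.length, p, tag)
  else best

def isBoy_alt (name : String) : Bool :=
  let s := cropB name.toList
  if nhWB.any (fun w => PySem.Chars.isIn w s) then false
  else
    match girlWB.foldl (bStep s false) (boyWB.foldl (bStep s true) none) with
    | some (_, _, tag) => tag
    | none => false

-- ===== PRECONDITION & SPEC =====
def Spec_isBoy (name : String) (out : Bool) : Prop := out = isBoy_alt name
instance (name : String) (out : Bool) : Decidable (Spec_isBoy name out) := by unfold Spec_isBoy; infer_instance

-- ===== CLAIM (what is proved, stated in full; the proofs are below) =====
def Claim_equal_isBoy : Prop := ∀ (name : String), Dom_isBoy name → Spec_isBoy name (isBoy name)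

-- ===== LEMMAS AND PROOFS =====

-- B's split word tables are exactly A's literal lists
set_option maxRecDepth 1000000 in
set_option maxHeartbeats 1000000 in
lemma boyWB_eq : boyWB = boyW := by decide
set_option maxRecDepth 1000000 in
set_option maxHeartbeats 1000000 in
lemma girlWB_eq : girlWB = girlW := by decide
set_option maxRecDepth 100000 in
lemma nhWB_eq : nhWB = notHumanW := by decide

-- B's zip-filter crop computes A's fold-with-last-character crop
lemma cropB_go (s acc : List Char) (prev : Char) :
    (s.foldl (fun (st : List Char × Char) c =>
        (if c != st.2 && c != '.' && c != '_' then st.1 ++ [c] else st.1, c)) (acc, prev)).1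
      = acc ++ (((prev :: s).zip s).filter
          (fun pc => pc.2 != pc.1 && pc.2 != '.' && pc.2 != '_')).map Prod.snd := by
  induction s generalizing acc prev with
  | nil => simp
  | cons c cs ih =>
    rw [List.foldl_cons, ih]
    simp only [List.zip_cons_cons, List.filter_cons]
    by_cases h : (c != prev && c != '.' && c != '_') = true
    · simp [h]
    · simp [h]

lemma cropB_eq (s : List Char) : cropB s = pyCrop s := by
  rw [cropB, pyCrop, cropB_go]
  simp

-- combined word list of B's two passes, tagged boy=true/girl=false, and the untupled step
def wsOf : List (List Char × Bool) :=
  boyW.map (fun w => (w, true)) ++ girlW.map (fun w => (w, false))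

def step2 (s : List Char) (acc : Option (Nat × Int × Bool)) (wt : List Char × Bool) :
    Option (Nat × Int × Bool) :=
  bStep s wt.2 acc wt.1

-- B's strict priority: longer wins, equal length → smaller position wins
def keyBetter (c d : Nat × Int) : Prop := d.1 < c.1 ∨ (c.1 = d.1 ∧ c.2 < d.2)

-- ---- word-list facts ----
set_option maxRecDepth 100000 in
lemma boyW_len : ∀ w ∈ boyW, 2 ≤ w.length := by decide
set_option maxRecDepth 100000 in
lemma girlW_len : ∀ w ∈ girlW, 2 ≤ w.length := by decide
set_option maxRecDepth 100000 in
lemma nhW_len : ∀ w ∈ notHumanW, 2 ≤ w.length := by decide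
set_option maxRecDepth 1000000 in
set_option maxHeartbeats 2000000 in
lemma boy_girl_disj : ∀ w ∈ girlW, w ∉ boyW := by decide

-- ---- range shapes ----
lemma outer_eq (n : Nat) :
    PySem.List.pyRange (n : Int) 1 (-1)
      = List.map (fun k : Nat => ((n - k : Nat) : Int)) (List.range (n - 1)) := by
  unfold PySem.List.pyRange
  norm_num
  rcases Nat.lt_or_ge 1 n with h | h
  · rw [if_pos (by exact_mod_cast h)]
    apply List.map_congr_left
    intro k hk
    have hk' : k < n - 1 := List.mem_range.1 hk
    omega
  · rw [if_neg (by exact_mod_cast Nat.not_lt.2 h)]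
    have : n - 1 = 0 := by omega
    simp [this]

lemma mem_outer {n : Nat} {i : Int} :
    i ∈ PySem.List.pyRange (n : Int) 1 (-1) ↔ ∃ L : Nat, i = (L : Int) ∧ 2 ≤ L ∧ L ≤ n := by
  rw [outer_eq]
  simp only [List.mem_map, List.mem_range]
  constructor
  · rintro ⟨k, hk, rfl⟩
    exact ⟨n - k, rfl, by omega, by omega⟩
  · rintro ⟨L, rfl, h2, hL⟩
    exact ⟨n - L, by omega, by omega⟩

lemma outer_pairwise (n : Nat) :
    (PySem.List.pyRange (n : Int) 1 (-1)).Pairwise (· > ·) := by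
  rw [outer_eq, List.pairwise_map]
  refine List.Pairwise.imp_of_mem ?_ (List.pairwise_lt_range (n := n - 1))
  intro a b ha hb hab
  have ha' : a < n - 1 := List.mem_range.1 ha
  have hb' : b < n - 1 := List.mem_range.1 hb
  show ((n - a : Nat) : Int) > ((n - b : Nat) : Int)
  omega

lemma inner_eq (n L : Nat) (h : L ≤ n) :
    PySem.List.pyRange 0 ((n : Int) - (L : Int) + 1) 1
      = List.map (fun k : Nat => (k : Int)) (List.range (n - L + 1)) := by
  have h1 : (n : Int) - (L : Int) + 1 = ((n - L + 1 : Nat) : Int) := by omega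
  rw [h1, PySem.List.pyRange_zero_natCast]

lemma inner_pairwise (m : Nat) :
    (List.map (fun k : Nat => (k : Int)) (List.range m)).Pairwise (· < ·) := by
  rw [List.pairwise_map]
  refine List.Pairwise.imp_of_mem ?_ (List.pairwise_lt_range (n := m))
  intro a b _ _ hab
  exact_mod_cast hab

-- ---- substring facts ----
lemma sub_infix (s : List Char) (j i : Nat) : (s.drop j).take i <:+: s :=
  ((List.take_prefix i (s.drop j)).isInfix).trans ((List.drop_suffix j s).isInfix)

lemma occurs_iff (s w : List Char) (j : Nat) :
    (s.drop j).take w.length = w ↔ w <+: s.drop j := by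
  rw [List.prefix_iff_eq_take]; exact ⟨fun h' => h'.symm, fun h' => h'.symm⟩

lemma sub_len (s : List Char) (j i : Nat) (h : j + i ≤ s.length) :
    ((s.drop j).take i).length = i := by
  simp [List.length_take, List.length_drop]; omega

lemma infix_exists (w s : List Char) (hw : 1 ≤ w.length) (h : PySem.Chars.isIn w s = true) :
    ∃ j, j + w.length ≤ s.length ∧ (s.drop j).take w.length = w := by
  obtain ⟨j, hj⟩ := (PySem.Chars.exists_prefix_drop_iff_isIn w s).2 h
  refine ⟨j, ?_, (occurs_iff s w j).2 hj⟩
  have := hj.length_le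
  simp [List.length_drop] at this
  omega

lemma find_nonneg_of_sub (s : List Char) (j i : Nat) :
    0 ≤ PySem.Chars.find s ((s.drop j).take i) :=
  (PySem.Chars.find_nonneg_iff s _).2 (sub_infix s j i)

lemma find_le_of_occurs (s w : List Char) (j : Nat)
    (h : (s.drop j).take w.length = w) :
    0 ≤ PySem.Chars.find s w ∧ PySem.Chars.find s w ≤ (j : Int) := by
  have hpre : w <+: s.drop j := (occurs_iff s w j).1 h
  have h0 : 0 ≤ PySem.Chars.find s w := by
    rw [PySem.Chars.find_nonneg_iff]
    exact hpre.isInfix.trans (List.drop_suffix j s).isInfix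
  obtain ⟨h1, h2⟩ := PySem.Chars.find_spec h0
  refine ⟨h0, ?_⟩
  by_cases h' : PySem.Chars.find s w ≤ (j : Int)
  · exact h'
  · exact absurd hpre (h2 j (by omega))

-- ---- scan lemmas for A's loops ----
lemma rpInner_false (s : List Char) (i : Int) (js : List Int)
    (h : ∀ j ∈ js, PySem.List.slice s (some j) (some (j + i)) ∉ notHumanW) :
    rpInner s i js = false := by
  induction js with
  | nil => rfl
  | cons j js ih =>
    have h1 := h j (by simp)
    have h2 := ih fun j' hj' => h j' (by simp [hj'])
    simp [rpInner, h1, h2]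

lemma rpInner_true (s : List Char) (i : Int) (js : List Int) (j0 : Int) (hm : j0 ∈ js)
    (h : PySem.List.slice s (some j0) (some (j0 + i)) ∈ notHumanW) :
    rpInner s i js = true := by
  induction js with
  | nil => cases hm
  | cons j js ih =>
    simp only [rpInner]
    rcases List.mem_cons.1 hm with rfl | hm'
    · simp [h]
    · split
      · rfl
      · exact ih hm'

lemma rpOuter_true (s : List Char) (n : Int) (is : List Int)
    (h : ∀ i ∈ is, rpInner s i (PySem.List.pyRange 0 (n - i + 1) 1) = false) :
    rpOuter s n is = true := by
  induction is with
  | nil => rfl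
  | cons i is ih =>
    have h2 := ih fun i' hi' => h i' (by simp [hi'])
    simp [rpOuter, h i (by simp), h2]

lemma rpOuter_false (s : List Char) (n : Int) (is : List Int) (i0 : Int) (hm : i0 ∈ is)
    (h : rpInner s i0 (PySem.List.pyRange 0 (n - i0 + 1) 1) = true) :
    rpOuter s n is = false := by
  induction is with
  | nil => cases hm
  | cons i is ih =>
    simp only [rpOuter]
    rcases List.mem_cons.1 hm with rfl | hm'
    · simp [h]
    · split
      · rfl
      · exact ih hm'

lemma sbInner_none (s : List Char) (i : Int) (js : List Int)
    (h : ∀ j ∈ js, PySem.List.slice s (some j) (some (j + i)) ∉ boyW ∧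
         PySem.List.slice s (some j) (some (j + i)) ∉ girlW) :
    sbInner s i js = none := by
  induction js with
  | nil => rfl
  | cons j js ih =>
    have h1 := h j (by simp)
    have h2 := ih fun j' hj' => h j' (by simp [hj'])
    simp [sbInner, h1.1, h1.2, h2]

lemma sbInner_first (s : List Char) (i : Int) (js : List Int) (j0 : Int) (b : Bool)
    (hm : j0 ∈ js) (hs : js.Pairwise (· < ·))
    (hhit : (PySem.List.slice s (some j0) (some (j0 + i)) ∈ boyW ∧ b = true) ∨
            (PySem.List.slice s (some j0) (some (j0 + i)) ∉ boyW ∧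
             PySem.List.slice s (some j0) (some (j0 + i)) ∈ girlW ∧ b = false))
    (hn : ∀ j ∈ js, j < j0 →
      PySem.List.slice s (some j) (some (j + i)) ∉ boyW ∧
      PySem.List.slice s (some j) (some (j + i)) ∉ girlW) :
    sbInner s i js = some b := by
  induction js with
  | nil => cases hm
  | cons j js ih =>
    rcases List.mem_cons.1 hm with rfl | hm'
    · rcases hhit with ⟨hb, rfl⟩ | ⟨hnb, hg, rfl⟩
      · simp [sbInner, hb]
      · simp [sbInner, hnb, hg]
    · have hj : j < j0 := (List.pairwise_cons.1 hs).1 j0 hm'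
      have h1 := hn j (by simp) hj
      have h2 := ih hm' (List.pairwise_cons.1 hs).2
        (fun j' hj' hlt => hn j' (by simp [hj']) hlt)
      simp [sbInner, h1.1, h1.2, h2]

lemma sbOuter_false (s : List Char) (n : Int) (is : List Int)
    (h : ∀ i ∈ is, sbInner s i (PySem.List.pyRange 0 (n - i + 1) 1) = none) :
    sbOuter s n false is = false := by
  induction is with
  | nil => rfl
  | cons i is ih =>
    have h2 := ih fun i' hi' => h i' (by simp [hi'])
    simp [sbOuter, h i (by simp), h2]

lemma sbOuter_first (s : List Char) (n : Int) (is : List Int) (i0 : Int) (b : Bool)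
    (hm : i0 ∈ is) (hs : is.Pairwise (· > ·))
    (h0 : sbInner s i0 (PySem.List.pyRange 0 (n - i0 + 1) 1) = some b)
    (hn : ∀ i ∈ is, i0 < i → sbInner s i (PySem.List.pyRange 0 (n - i + 1) 1) = none) :
    sbOuter s n false is = b := by
  induction is with
  | nil => cases hm
  | cons i is ih =>
    rcases List.mem_cons.1 hm with rfl | hm'
    · simp [sbOuter, h0]
    · have hi : i0 < i := (List.pairwise_cons.1 hs).1 i0 hm'
      have h2 := ih hm' (List.pairwise_cons.1 hs).2
        (fun i' hi' hlt => hn i' (by simp [hi']) hlt)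
      simp [sbOuter, hn i (by simp) hi, h2]

-- ---- fold lemmas for B's loop ----
lemma keyBetter_trans {a b c : Nat × Int} (h1 : keyBetter a b) (h2 : keyBetter b c) :
    keyBetter a c := by
  unfold keyBetter at *; omega

lemma keyBetter_irrefl (a : Nat × Int) : ¬ keyBetter a a := by
  unfold keyBetter; omega

lemma keyBetter_neg_trans {a b c : Nat × Int} (h1 : ¬ keyBetter a b) (h2 : ¬ keyBetter b c) :
    ¬ keyBetter a c := by
  unfold keyBetter at *; omega

lemma step2_none (s : List Char) (wt : List Char × Bool)
    (hf : 0 ≤ PySem.Chars.find s wt.1) :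
    step2 s none wt = some (wt.1.length, PySem.Chars.find s wt.1, wt.2) := by
  simp only [step2, bStep]
  rw [if_pos (by simp [hf])]

lemma step2_none_neg (s : List Char) (wt : List Char × Bool)
    (hf : PySem.Chars.find s wt.1 < 0) :
    step2 s none wt = none := by
  simp only [step2, bStep]
  rw [if_neg (by simp; omega)]

lemma fold_none (s : List Char) (ws : List (List Char × Bool)) (acc : Option (Nat × Int × Bool)) :
    ws.foldl (step2 s) acc = none ↔ acc = none ∧ ∀ wt ∈ ws, PySem.Chars.find s wt.1 < 0 := by
  induction ws generalizing acc with
  | nil => simp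
  | cons w ws ih =>
    rw [List.foldl_cons, ih]
    constructor
    · rintro ⟨hstep, hall⟩
      rcases acc with _ | d
      · refine ⟨rfl, ?_⟩
        intro wt hwt
        rcases List.mem_cons.1 hwt with rfl | h'
        · by_contra hc
          rw [step2_none s wt (by omega)] at hstep
          cases hstep
        · exact hall wt h'
      · exfalso
        obtain ⟨l, q, t⟩ := d
        simp only [step2, bStep] at hstep
        split at hstep <;> cases hstep
    · rintro ⟨rfl, hall⟩
      refine ⟨step2_none_neg s w (hall w (by simp)), ?_⟩
      exact fun wt hwt => hall wt (by simp [hwt])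

lemma fold_exists (s : List Char) (ws : List (List Char × Bool)) (acc : Option (Nat × Int × Bool))
    (c : Nat × Int × Bool) (h : ws.foldl (step2 s) acc = some c) :
    acc = some c ∨ ∃ wt ∈ ws, 0 ≤ PySem.Chars.find s wt.1 ∧
      c = (wt.1.length, PySem.Chars.find s wt.1, wt.2) := by
  induction ws generalizing acc with
  | nil => exact Or.inl (by simpa using h)
  | cons w ws ih =>
    rw [List.foldl_cons] at h
    rcases ih (step2 s acc w) h with hstep | ⟨wt, hwt, hf, hc⟩
    · rcases acc with _ | d
      · by_cases hc0 : 0 ≤ PySem.Chars.find s w.1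
        · rw [step2_none s w hc0] at hstep
          exact Or.inr ⟨w, by simp, hc0, (Option.some_inj.1 hstep).symm⟩
        · rw [step2_none_neg s w (by omega)] at hstep
          cases hstep
      · obtain ⟨l, q, t⟩ := d
        simp only [step2, bStep] at hstep
        split at hstep
        · rename_i hcond
          simp only [Bool.and_eq_true, decide_eq_true_eq] at hcond
          exact Or.inr ⟨w, by simp, hcond.1, (Option.some_inj.1 hstep).symm⟩
        · exact Or.inl hstep
    · exact Or.inr ⟨wt, by simp [hwt], hf, hc⟩

lemma fold_min (s : List Char) (ws : List (List Char × Bool)) (acc : Option (Nat × Int × Bool))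
    (c : Nat × Int × Bool) (h : ws.foldl (step2 s) acc = some c) :
    (∀ d, acc = some d → ¬ keyBetter (d.1, d.2.1) (c.1, c.2.1)) ∧
    ∀ wt ∈ ws, 0 ≤ PySem.Chars.find s wt.1 →
      ¬ keyBetter (wt.1.length, PySem.Chars.find s wt.1) (c.1, c.2.1) := by
  induction ws generalizing acc with
  | nil =>
    refine ⟨?_, by simp⟩
    rintro d rfl
    have : d = c := by simpa using h
    subst this
    exact keyBetter_irrefl _
  | cons w ws ih =>
    rw [List.foldl_cons] at h
    obtain ⟨H1, H2⟩ := ih (step2 s acc w) h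
    have hstep : ∀ d, acc = some d → ¬ keyBetter (d.1, d.2.1) (c.1, c.2.1) := by
      rintro ⟨l, q, t⟩ rfl
      by_cases hcond : (decide (0 ≤ PySem.Chars.find s w.1) &&
          (decide (l < w.1.length) ||
           (decide (w.1.length = l) && decide (PySem.Chars.find s w.1 < q)))) = true
      · have hkB : keyBetter (w.1.length, PySem.Chars.find s w.1) (l, q) := by
          simp only [Bool.and_eq_true, Bool.or_eq_true, decide_eq_true_eq] at hcond
          unfold keyBetter
          rcases hcond.2 with h' | ⟨h1', h2'⟩
          · exact Or.inl h'
          · exact Or.inr ⟨h1', h2'⟩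
        have hsome : step2 s (some (l, q, t)) w
            = some (w.1.length, PySem.Chars.find s w.1, w.2) := by
          simp only [step2, bStep]
          rw [if_pos hcond]
        intro hk
        exact H1 _ hsome (keyBetter_trans hkB hk)
      · have hsome : step2 s (some (l, q, t)) w = some (l, q, t) := by
          simp only [step2, bStep]
          rw [if_neg hcond]
        exact H1 _ hsome
    refine ⟨hstep, ?_⟩
    intro wt hwt hf
    rcases List.mem_cons.1 hwt with rfl | h'
    · rcases hacc : acc with _ | d
      · subst hacc
        exact H1 _ (step2_none s wt hf)
      · obtain ⟨l, q, t⟩ := d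
        subst hacc
        by_cases hcond : (decide (0 ≤ PySem.Chars.find s wt.1) &&
            (decide (l < wt.1.length) ||
             (decide (wt.1.length = l) && decide (PySem.Chars.find s wt.1 < q)))) = true
        · have hsome : step2 s (some (l, q, t)) wt
              = some (wt.1.length, PySem.Chars.find s wt.1, wt.2) := by
            simp only [step2, bStep]
            rw [if_pos hcond]
          exact H1 _ hsome
        · have hsome : step2 s (some (l, q, t)) wt = some (l, q, t) := by
            simp only [step2, bStep]
            rw [if_neg hcond]
          have hnb : ¬ keyBetter (wt.1.length, PySem.Chars.find s wt.1) (l, q) := by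
            intro hk
            apply hcond
            simp only [Bool.and_eq_true, Bool.or_eq_true, decide_eq_true_eq]
            unfold keyBetter at hk
            refine ⟨hf, ?_⟩
            rcases hk with h' | ⟨h1', h2'⟩
            · exact Or.inl h'
            · exact Or.inr ⟨h1', h2'⟩
          have hd : ¬ keyBetter ((l, q, t).1, (l, q, t).2.1) (c.1, c.2.1) := hstep _ rfl
          exact keyBetter_neg_trans hnb hd
    · exact H2 wt h' hf

lemma mem_ws_boy {t : List Char} (h : t ∈ boyW) : (t, true) ∈ wsOf :=
  List.mem_append_left _ (List.mem_map.2 ⟨t, h, rfl⟩)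

lemma mem_ws_girl {t : List Char} (h : t ∈ girlW) : (t, false) ∈ wsOf :=
  List.mem_append_right _ (List.mem_map.2 ⟨t, h, rfl⟩)

lemma mem_ws_elim {wt : List Char × Bool} (h : wt ∈ wsOf) :
    (wt.1 ∈ boyW ∧ wt.2 = true) ∨ (wt.1 ∈ girlW ∧ wt.2 = false) := by
  rcases List.mem_append.1 h with h' | h' <;>
    [left; right] <;>
    · obtain ⟨w, hw, rfl⟩ := List.mem_map.1 h'
      exact ⟨hw, rfl⟩

lemma fold_eq (s : List Char) :
    girlW.foldl (bStep s false) (boyW.foldl (bStep s true) none) = wsOf.foldl (step2 s) none := by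
  rw [wsOf, List.foldl_append, List.foldl_map, List.foldl_map]
  rfl

-- ---- the two halves ----
lemma guard_eq (s : List Char) :
    rpOuter s (s.length : Int) (PySem.List.pyRange (s.length : Int) 1 (-1))
      = !(notHumanW.any fun w => PySem.Chars.isIn w s) := by
  cases hA : (notHumanW.any fun w => PySem.Chars.isIn w s) with
  | true =>
    simp only [Bool.not_true]
    obtain ⟨w, hw, hin⟩ := List.any_eq_true.1 hA
    have h2 : 2 ≤ w.length := nhW_len w hw
    obtain ⟨j, hjle, hocc⟩ := infix_exists w s (by omega) hin
    apply rpOuter_false s _ _ ((w.length : Nat) : Int)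
    · exact mem_outer.2 ⟨w.length, rfl, h2, by omega⟩
    · rw [inner_eq s.length w.length (by omega)]
      apply rpInner_true s _ _ ((j : Nat) : Int)
      · exact List.mem_map.2 ⟨j, List.mem_range.2 (by omega), rfl⟩
      · rw [show ((j : Nat) : Int) + ((w.length : Nat) : Int)
            = ((j : Nat) : Int) + ((w.length : Nat) : Int) from rfl,
          PySem.List.slice_natCast_add, hocc]
        exact hw
  | false =>
    simp only [Bool.not_false]
    have hall : ∀ w ∈ notHumanW, PySem.Chars.isIn w s = false := by
      intro w hw
      simpa using List.any_eq_false.mp hA w hw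
    apply rpOuter_true
    intro i hi
    obtain ⟨L, rfl, h2, hLn⟩ := mem_outer.1 hi
    rw [inner_eq s.length L hLn]
    apply rpInner_false
    intro j hj
    obtain ⟨k, hk, rfl⟩ := List.mem_map.1 hj
    rw [PySem.List.slice_natCast_add]
    intro hmem
    have : PySem.Chars.isIn ((s.drop k).take L) s = true :=
      (PySem.Chars.isIn_iff_infix _ _).2 (sub_infix s k L)
    rw [hall _ hmem] at this
    cases this

lemma search_eq (s : List Char) :
    sbOuter s (s.length : Int) false (PySem.List.pyRange (s.length : Int) 1 (-1))
      = (match wsOf.foldl (step2 s) none with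
         | some (_, _, tag) => tag
         | none => false) := by
  cases hr : wsOf.foldl (step2 s) none with
  | none =>
    have hall := ((fold_none s wsOf none).1 hr).2
    apply sbOuter_false
    intro i hi
    obtain ⟨L, rfl, h2, hLn⟩ := mem_outer.1 hi
    rw [inner_eq s.length L hLn]
    apply sbInner_none
    intro j hj
    obtain ⟨k, hk, rfl⟩ := List.mem_map.1 hj
    rw [PySem.List.slice_natCast_add]
    constructor
    · intro hmem
      have h1 : PySem.Chars.find s ((s.drop k).take L) < 0 := hall _ (mem_ws_boy hmem)
      have := find_nonneg_of_sub s k L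
      omega
    · intro hmem
      have h1 : PySem.Chars.find s ((s.drop k).take L) < 0 := hall _ (mem_ws_girl hmem)
      have := find_nonneg_of_sub s k L
      omega
  | some c =>
    rcases fold_exists s wsOf none c hr with hacc | ⟨wt, hwt, hf, hc⟩
    · cases hacc
    have Hmin0 := (fold_min s wsOf none c hr).2
    subst hc
    have Hmin : ∀ wt' ∈ wsOf, 0 ≤ PySem.Chars.find s wt'.1 →
        ¬ keyBetter (wt'.1.length, PySem.Chars.find s wt'.1)
          (wt.1.length, PySem.Chars.find s wt.1) := by
      simpa using Hmin0
    have hfind := PySem.Chars.find_spec hf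
    have hflen := PySem.Chars.find_le_length s wt.1
    have hocc : (s.drop (PySem.Chars.find s wt.1).toNat).take wt.1.length = wt.1 :=
      (occurs_iff s wt.1 _).2 hfind.1
    have hlenw : wt.1.length ≤ (s.drop (PySem.Chars.find s wt.1).toNat).length :=
      hfind.1.length_le
    have hlen : (PySem.Chars.find s wt.1).toNat + wt.1.length ≤ s.length := by
      simp [List.length_drop] at hlenw
      omega
    have h2L : 2 ≤ wt.1.length := by
      rcases mem_ws_elim hwt with ⟨hb, _⟩ | ⟨hg, _⟩
      · exact boyW_len _ hb
      · exact girlW_len _ hg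
    have hp : ((PySem.Chars.find s wt.1).toNat : Int) = PySem.Chars.find s wt.1 :=
      Int.toNat_of_nonneg hf
    apply sbOuter_first s _ _ ((wt.1.length : Nat) : Int) wt.2
    · exact mem_outer.2 ⟨wt.1.length, rfl, h2L, by omega⟩
    · exact outer_pairwise _
    · rw [inner_eq s.length wt.1.length (by omega)]
      apply sbInner_first s _ _ (((PySem.Chars.find s wt.1).toNat : Nat) : Int) wt.2
      · exact List.mem_map.2 ⟨_, List.mem_range.2 (by omega), rfl⟩
      · exact inner_pairwise _
      · rw [PySem.List.slice_natCast_add, hocc]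
        rcases mem_ws_elim hwt with ⟨hb, ht⟩ | ⟨hg, ht⟩
        · exact Or.inl ⟨hb, ht⟩
        · exact Or.inr ⟨boy_girl_disj _ hg, hg, ht⟩
      · intro j hj hjlt
        obtain ⟨k, hk, rfl⟩ := List.mem_map.1 hj
        have hklt : k < (PySem.Chars.find s wt.1).toNat := by exact_mod_cast hjlt
        rw [PySem.List.slice_natCast_add]
        have hkL : k + wt.1.length ≤ s.length := by omega
        have hnot : ∀ tag : Bool, ((s.drop k).take wt.1.length, tag) ∈ wsOf → False := by
          intro tag hmem
          set t := (s.drop k).take wt.1.length with ht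
          have htlen : t.length = wt.1.length := sub_len s k wt.1.length hkL
          have hto : (s.drop k).take t.length = t := by rw [htlen]
          obtain ⟨hf', hle'⟩ := find_le_of_occurs s t k hto
          have hmin : ¬ keyBetter (t.length, PySem.Chars.find s t)
              (wt.1.length, PySem.Chars.find s wt.1) := Hmin (t, tag) hmem hf'
          apply hmin
          rw [htlen]
          exact Or.inr ⟨rfl, by omega⟩
        constructor
        · intro hmem
          exact hnot true (mem_ws_boy hmem)
        · intro hmem
          exact hnot false (mem_ws_girl hmem)
    · intro i hi hgt
      obtain ⟨M, rfl, h2M, hMn⟩ := mem_outer.1 hi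
      have hML : wt.1.length < M := by exact_mod_cast hgt
      rw [inner_eq s.length M hMn]
      apply sbInner_none
      intro j hj
      obtain ⟨k, hk, rfl⟩ := List.mem_map.1 hj
      have hk' : k < s.length - M + 1 := List.mem_range.1 hk
      rw [PySem.List.slice_natCast_add]
      have hkM : k + M ≤ s.length := by omega
      have hnot : ∀ tag : Bool, ((s.drop k).take M, tag) ∈ wsOf → False := by
        intro tag hmem
        set t := (s.drop k).take M with ht
        have htlen : t.length = M := sub_len s k M hkM
        have hf' : 0 ≤ PySem.Chars.find s t := find_nonneg_of_sub s k M
        have hmin : ¬ keyBetter (t.length, PySem.Chars.find s t)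
            (wt.1.length, PySem.Chars.find s wt.1) := Hmin (t, tag) hmem hf'
        apply hmin
        rw [htlen]
        exact Or.inl (by omega)
      constructor
      · intro hmem
        exact hnot true (mem_ws_boy hmem)
      · intro hmem
        exact hnot false (mem_ws_girl hmem)

-- ===== VERDICT (by name: the statement is the Claim_ definition above) =====
theorem isBoy_spec : Claim_equal_isBoy := by
  intro name _
  unfold Spec_isBoy isBoy isBoy_alt realPerson
  simp only [cropB_eq, boyWB_eq, girlWB_eq, nhWB_eq]
  rw [guard_eq (pyCrop name.toList)]
  cases hAny : (notHumanW.any fun w => PySem.Chars.isIn w (pyCrop name.toList)) with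
  | true => simp
  | false => simp [search_eq, fold_eq]
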